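-- pv_equiv track=rewrite | github.com/Lozovaca/GI2022Project | Burrows0Wheeler.py | rankBwt
-- ===== SOURCE A (Python) =====
-- def rankBwt(bw):
--     ''' Given BWT string bw, return parallel list of B-ranks.  Also
--         returns tots: map from character to # times it appears. '''
--     tots = dict()
--     ranks = []
--     for c in bw:
--         if c not in tots: tots[c] = 0
--         ranks.append(tots[c])
--         tots[c] += 1
--     return ranks, tots
-- ===== SOURCE B (Python) =====
-- def rankBwt(bw):
--     ''' Group-then-scatter: build per-character position lists in one pass,
--         then scatter each occurrence's order-of-appearance rank into a
--         preallocated list; tots are the group sizes. '''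
--     pairs = [(c, i) for i, c in enumerate(bw)]
--     positions = {}
--     for c, i in pairs:
--         positions.setdefault(c, []).append(i)
--     ranks = [0] * len(bw)
--     for c, idxs in positions.items():
--         for r, i in enumerate(idxs):
--             ranks[i] = r
--     tots = {c: len(idxs) for c, idxs in positions.items()}
--     return ranks, tots
-- ===== Notes on version B (the rewrite author's own statement) =====
-- stated objective: alternative
-- what changed: B first groups the positions of each character into a dict of index lists, then scatters order-of-appearance ranks into a preallocated list and derives tots as the group sizes, instead of A's single pass with a running count per character.
import Mathlib
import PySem

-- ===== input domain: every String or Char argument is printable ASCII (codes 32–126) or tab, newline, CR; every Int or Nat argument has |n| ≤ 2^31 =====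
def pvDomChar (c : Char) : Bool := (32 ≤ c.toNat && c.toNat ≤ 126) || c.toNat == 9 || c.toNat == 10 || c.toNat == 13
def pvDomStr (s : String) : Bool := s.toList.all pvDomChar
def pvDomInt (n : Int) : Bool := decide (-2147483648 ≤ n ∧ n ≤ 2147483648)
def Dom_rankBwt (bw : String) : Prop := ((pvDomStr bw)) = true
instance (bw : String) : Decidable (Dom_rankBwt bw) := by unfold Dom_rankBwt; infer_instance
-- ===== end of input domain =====

-- B groups the positions of each character, then scatters order-of-appearance ranks and takes group sizes as tots; A keeps one running count per character. Alternative decomposition, same cost.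

-- ===== PORT A =====
-- one loop iteration of A: ensure key, append current count, bump count
def rankBwtStep (st : PySem.Dict String Int × List Int) (c : Char) : PySem.Dict String Int × List Int :=
  let s := String.mk [c]
  let tots := if st.1.contains s then st.1 else st.1.insert s 0
  let r := tots.getD s 0   -- tots[c]; the key is always present at this point, so the lookup never raises
  (tots.insert s (r + 1), st.2 ++ [r])

def rankBwt (bw : String) : List Int × (List (String × Int)) :=
  let st := bw.toList.foldl rankBwtStep (PySem.Dict.empty, [])
  (st.2, st.1.items)

-- ===== PORT B =====
def rankBwt_alt (bw : String) : List Int × (List (String × Int)) :=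
  let pairs := (PySem.List.enumerate bw.toList 0).map (fun q => (String.mk [q.2], q.1))
  let positions := pairs.foldl (fun d p => d.modify p.1 [] (fun v => v ++ [p.2]))
      (PySem.Dict.empty : PySem.Dict String (List Int))
  let ranks := positions.items.foldl
      (fun a g => (PySem.List.enumerate g.2 0).foldl (fun a q => a.set q.2.toNat q.1) a)
      (List.replicate bw.toList.length (0 : Int))
  let tots := positions.items.map (fun g => (g.1, (g.2.length : Int)))
  (ranks, tots)

-- ===== PRECONDITION & SPEC =====
def Spec_rankBwt (bw : String) (out : List Int × (List (String × Int))) : Prop := out = rankBwt_alt bw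
instance (bw : String) (out : List Int × (List (String × Int))) : Decidable (Spec_rankBwt bw out) := by unfold Spec_rankBwt; infer_instance

-- ===== CLAIM (what is proved, stated in full; the proofs are below) =====
def Claim_equal_rankBwt : Prop := ∀ (bw : String), Dom_rankBwt bw → Spec_rankBwt bw (rankBwt bw)

-- ===== LEMMAS AND PROOFS =====

def sing (c : Char) : String := String.mk [c]

def pairsL (l : List Char) : List (String × Int) :=
  (PySem.List.enumerate l 0).map (fun q => (String.mk [q.2], q.1))

def posD (l : List Char) : PySem.Dict String (List Int) :=
  (pairsL l).foldl (fun d p => d.modify p.1 [] (fun v => v ++ [p.2]))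
    (PySem.Dict.empty : PySem.Dict String (List Int))

def innerF (v : List Int) (a : List Int) : List Int :=
  (PySem.List.enumerate v 0).foldl (fun a q => a.set q.2.toNat q.1) a

def scat (G : List (String × List Int)) (a : List Int) : List Int :=
  G.foldl (fun a g => innerF g.2 a) a

def ranksB (l : List Char) : List Int := scat (posD l).items (List.replicate l.length (0 : Int))

lemma stepA_eq (st : PySem.Dict String Int × List Int) (c : Char) :
    rankBwtStep st c =
      (st.1.insert (sing c) (st.1.getD (sing c) 0 + 1),
       st.2 ++ [st.1.getD (sing c) 0]) := by
  unfold rankBwtStep sing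
  dsimp only
  by_cases h : st.1.contains (String.mk [c]) = true
  · rw [if_pos h]
  · have h' : st.1.contains (String.mk [c]) = false := by simpa using h
    rw [if_neg h, PySem.Dict.getD_insert_self, PySem.Dict.insert_insert_self,
        PySem.Dict.getD_of_not_contains st.1 0 h']

lemma foldSet_length (qs : List (Int × Int)) (a : List Int) :
    (qs.foldl (fun a q => a.set q.2.toNat q.1) a).length = a.length := by
  induction qs generalizing a with
  | nil => rfl
  | cons q qs ih => simp only [List.foldl]; rw [ih, List.length_set]

lemma foldSet_append (qs : List (Int × Int)) (a : List Int) (x : Int)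
    (h : ∀ q ∈ qs, q.2.toNat < a.length) :
    qs.foldl (fun a q => a.set q.2.toNat q.1) (a ++ [x])
      = qs.foldl (fun a q => a.set q.2.toNat q.1) a ++ [x] := by
  induction qs generalizing a with
  | nil => rfl
  | cons q qs ih =>
      simp only [List.foldl]
      rw [List.set_append, if_pos (h q List.mem_cons_self)]
      exact ih _ (fun p hp => by rw [List.length_set]; exact h p (List.mem_cons_of_mem _ hp))

lemma innerF_length (v a : List Int) : (innerF v a).length = a.length := foldSet_length _ _

lemma innerF_append (v a : List Int) (x : Int) (h : ∀ i ∈ v, i.toNat < a.length) :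
    innerF v (a ++ [x]) = innerF v a ++ [x] := by
  apply foldSet_append
  intro q hq
  rcases (PySem.List.mem_enumerate_iff _ _ _).1 hq with ⟨k, hk, rfl⟩
  exact h _ (by simp)

lemma innerF_snoc (v : List Int) (y : Int) (a : List Int) :
    innerF (v ++ [y]) a = (innerF v a).set y.toNat (v.length : Int) := by
  unfold innerF
  rw [PySem.List.enumerate_append, List.foldl_append]
  simp [PySem.List.enumerate_cons, PySem.List.enumerate_nil]

lemma set_last (X : List Int) (y v : Int) : (X ++ [y]).set X.length v = X ++ [v] := by
  rw [List.set_append]; simp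

lemma scat_cons (g : String × List Int) (G : List (String × List Int)) (a : List Int) :
    scat (g :: G) a = scat G (innerF g.2 a) := rfl

lemma scat_cons' (k : String) (v : List Int) (G : List (String × List Int)) (a : List Int) :
    scat ((k, v) :: G) a = scat G (innerF v a) := rfl

lemma scat_nil (a : List Int) : scat [] a = a := rfl

lemma innerF_single (y : Int) (a : List Int) : innerF [y] a = a.set y.toNat 0 := by
  unfold innerF
  rw [PySem.List.enumerate_cons, PySem.List.enumerate_nil]
  rfl

lemma scat_append_eq (X Y : List (String × List Int)) (a : List Int) :
    scat (X ++ Y) a = scat Y (scat X a) := List.foldl_append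

lemma scat_length (G : List (String × List Int)) (a : List Int) : (scat G a).length = a.length := by
  induction G generalizing a with
  | nil => rfl
  | cons g G ih => rw [scat_cons, ih, innerF_length]

lemma scat_append (G : List (String × List Int)) (a : List Int) (x : Int)
    (h : ∀ g ∈ G, ∀ i ∈ g.2, i.toNat < a.length) :
    scat G (a ++ [x]) = scat G a ++ [x] := by
  induction G generalizing a with
  | nil => rfl
  | cons g G ih =>
      rw [scat_cons, scat_cons, innerF_append _ _ _ (h g List.mem_cons_self)]
      exact ih _ (fun g' hg' i hi => by
        rw [innerF_length]; exact h g' (List.mem_cons_of_mem _ hg') i hi)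

lemma pairsL_append (l : List Char) (c : Char) :
    pairsL (l ++ [c]) = pairsL l ++ [(sing c, (l.length : Int))] := by
  simp [pairsL, sing, PySem.List.enumerate_append, PySem.List.enumerate_cons,
        PySem.List.enumerate_nil]

lemma pairsL_fst (l : List Char) : (pairsL l).map Prod.fst = l.map sing := by
  unfold pairsL sing
  rw [List.map_map]
  conv_rhs => rw [← PySem.List.map_snd_enumerate l 0, List.map_map]
  rfl

lemma posD_keys (l : List Char) : (posD l).keys = PySem.Set.ofList (l.map sing) := by
  have h := PySem.Dict.keys_foldl_modify_key (pairsL l) Prod.fst ([] : List Int)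
      (fun _ p v => v ++ [p.2]) PySem.Dict.empty
  rw [PySem.Dict.keys_empty, PySem.Set.update_nil_left, pairsL_fst] at h
  exact h

lemma posD_nodup (l : List Char) : (posD l).keys.Nodup := by
  exact PySem.Dict.nodup_keys_foldl_modify_key (pairsL l) Prod.fst ([] : List Int)
      (fun _ p v => v ++ [p.2]) PySem.Dict.empty
      (by rw [PySem.Dict.keys_empty]; exact List.nodup_nil)

lemma posD_getD (l : List Char) (s : String) :
    (posD l).getD s [] = ((pairsL l).filter (fun p => p.1 == s)).map (·.2) := by
  have h := PySem.Dict.getD_foldl_modify_append (pairsL l)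
      (PySem.Dict.empty : PySem.Dict String (List Int)) s
  rw [PySem.Dict.getD_empty] at h
  exact h

lemma posD_items (l : List Char) :
    (posD l).items = (posD l).keys.map (fun k => (k, (posD l).getD k [])) :=
  PySem.Dict.items_eq_map_keys _ (posD_nodup l) []

lemma posD_getD_length (l : List Char) (s : String) :
    ((posD l).getD s []).length = (l.map sing).count s := by
  rw [posD_getD, List.length_map, ← List.countP_eq_length_filter, ← pairsL_fst,
      List.count_eq_countP, List.countP_map]
  rfl

lemma posD_getD_bound (l : List Char) (s : String) :
    ∀ i ∈ (posD l).getD s [], i.toNat < l.length := by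
  intro i hi
  rw [posD_getD] at hi
  obtain ⟨p, hp, rfl⟩ := List.mem_map.1 hi
  have hp1 := (List.mem_filter.1 hp).1
  simp only [pairsL, List.mem_map] at hp1
  obtain ⟨q, hq, rfl⟩ := hp1
  obtain ⟨k, hk, rfl⟩ := (PySem.List.mem_enumerate_iff _ _ _).1 hq
  simp; omega

lemma getD_snoc (l : List Char) (c : Char) (k : String) :
    (posD (l ++ [c])).getD k [] =
      (posD l).getD k [] ++ (if sing c == k then [(l.length : Int)] else []) := by
  rw [posD_getD, posD_getD, pairsL_append, List.filter_append, List.map_append]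
  by_cases h : sing c == k <;> simp [List.filter, h]

lemma ranksB_rec (l : List Char) (c : Char) :
    ranksB (l ++ [c]) = ranksB l ++ [((l.map sing).count (sing c) : Int)] := by
  have hn : (l ++ [c]).length = l.length + 1 := by simp
  have hrep : List.replicate (l.length + 1) (0 : Int)
      = List.replicate l.length (0 : Int) ++ [0] := List.replicate_succ'
  have hkeys' : (posD (l ++ [c])).keys = ((PySem.Set.ofList (l.map sing)).add (sing c)) := by
    rw [posD_keys, List.map_append]; simp [PySem.Set.ofList_append_singleton]
  have hKnodup : (PySem.Set.ofList (l.map sing)).Nodup := PySem.Set.nodup_ofList _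
  -- bound for groups of posD l
  have hbound : ∀ g ∈ (posD l).items, ∀ i ∈ g.2, i.toNat < l.length := by
    intro g hg i hi
    rw [posD_items] at hg
    obtain ⟨k, _, rfl⟩ := List.mem_map.1 hg
    exact posD_getD_bound l k i hi
  by_cases hmem : sing c ∈ (l.map sing)
  · -- repeated character
    have hK : (posD (l ++ [c])).keys = PySem.Set.ofList (l.map sing) := by
      rw [hkeys', PySem.Set.add_of_mem (by rw [PySem.Set.mem_ofList]; exact hmem)]
    obtain ⟨k1, k2, hk⟩ := List.append_of_mem
      ((PySem.Set.mem_ofList (l.map sing) (sing c)).2 hmem)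
    have hnd := hK ▸ posD_nodup (l ++ [c])
    rw [hk] at hnd
    have hnc1 : sing c ∉ k1 := by
      intro hmem1
      exact (List.disjoint_of_nodup_append hnd) hmem1 List.mem_cons_self
    have hnc2 : sing c ∉ k2 := by
      have := (List.nodup_append.1 hnd).2.1
      exact (List.nodup_cons.1 this).1
    have hne1 : ∀ k ∈ k1, (posD (l ++ [c])).getD k [] = (posD l).getD k [] := by
      intro k hk1
      rw [getD_snoc, if_neg (by simp only [beq_iff_eq]; intro h; exact hnc1 (h ▸ hk1)),
          List.append_nil]
    have hne2 : ∀ k ∈ k2, (posD (l ++ [c])).getD k [] = (posD l).getD k [] := by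
      intro k hk2
      rw [getD_snoc, if_neg (by simp only [beq_iff_eq]; intro h; exact hnc2 (h ▸ hk2)),
          List.append_nil]
    have hgc : (posD (l ++ [c])).getD (sing c) [] =
        (posD l).getD (sing c) [] ++ [(l.length : Int)] := by
      rw [getD_snoc, if_pos (by simp)]
    set idxs := (posD l).getD (sing c) [] with hidxs
    have hitems' : (posD (l ++ [c])).items =
        (k1.map (fun k => (k, (posD l).getD k [])))
        ++ (sing c, idxs ++ [(l.length : Int)])
        :: (k2.map (fun k => (k, (posD l).getD k []))) := by
      rw [posD_items, hK, hk]
      simp only [List.map_append, List.map_cons]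
      rw [hgc]
      congr 1
      · exact List.map_congr_left (fun k h => by rw [hne1 k h])
      · congr 1
        exact List.map_congr_left (fun k h => by rw [hne2 k h])
    have hitems : (posD l).items =
        (k1.map (fun k => (k, (posD l).getD k [])))
        ++ (sing c, idxs)
        :: (k2.map (fun k => (k, (posD l).getD k []))) := by
      rw [posD_items, posD_keys, hk]
      simp only [List.map_append, List.map_cons]
      rw [← hidxs]
    have hb1 : ∀ g ∈ k1.map (fun k => (k, (posD l).getD k [])), ∀ i ∈ g.2, i.toNat < l.length := by
      intro g hg i hi
      obtain ⟨k, _, rfl⟩ := List.mem_map.1 hg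
      exact posD_getD_bound l k i hi
    have hb2 : ∀ g ∈ k2.map (fun k => (k, (posD l).getD k [])), ∀ i ∈ g.2, i.toNat < l.length := by
      intro g hg i hi
      obtain ⟨k, _, rfl⟩ := List.mem_map.1 hg
      exact posD_getD_bound l k i hi
    unfold ranksB
    rw [hitems', hn, hrep, hitems]
    rw [scat_append_eq, scat_cons', scat_append_eq, scat_cons']
    rw [scat_append _ _ _ (by
      intro g hg i hi
      rw [List.length_replicate]; exact hb1 g hg i hi)]
    rw [innerF_snoc]
    rw [innerF_append _ _ _ (by
      intro i hi
      rw [scat_length, List.length_replicate]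
      exact posD_getD_bound l (sing c) i (hidxs ▸ hi))]
    rw [show ((l.length : Int)).toNat = l.length from Int.toNat_natCast _]
    have hlen : (innerF idxs (scat (k1.map (fun k => (k, (posD l).getD k [])))
        (List.replicate l.length (0 : Int)))).length = l.length := by
      rw [innerF_length, scat_length, List.length_replicate]
    have hset := set_last (innerF idxs (scat (k1.map (fun k => (k, (posD l).getD k [])))
        (List.replicate l.length (0 : Int)))) 0 (idxs.length : Int)
    rw [hlen] at hset
    rw [hset]
    rw [scat_append _ _ _ (by
      intro g hg i hi
      rw [innerF_length, scat_length, List.length_replicate]; exact hb2 g hg i hi)]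
    have hcnt : ((idxs.length : Nat) : Int) = (((l.map sing).count (sing c) : Nat) : Int) := by
      rw [hidxs, posD_getD_length]
    rw [hcnt]
  · -- first occurrence of this character
    have hK : (posD (l ++ [c])).keys = PySem.Set.ofList (l.map sing) ++ [sing c] := by
      rw [hkeys', PySem.Set.add_of_not_mem (by rw [PySem.Set.mem_ofList]; exact hmem)]
    have hgc : (posD (l ++ [c])).getD (sing c) [] = [(l.length : Int)] := by
      rw [getD_snoc, if_pos (by simp)]
      have h0 : ((posD l).getD (sing c) []).length = 0 := by
        rw [posD_getD_length]; exact List.count_eq_zero.2 hmem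
      rw [List.eq_nil_of_length_eq_zero h0]; rfl
    have hne : ∀ k ∈ PySem.Set.ofList (l.map sing),
        (posD (l ++ [c])).getD k [] = (posD l).getD k [] := by
      intro k hk1
      rw [getD_snoc, if_neg (by
        simp only [beq_iff_eq]
        intro h
        exact hmem (h ▸ ((PySem.Set.mem_ofList _ _).1 hk1))), List.append_nil]
    have hitems' : (posD (l ++ [c])).items
        = (posD l).items ++ [(sing c, [(l.length : Int)])] := by
      rw [posD_items, hK]
      simp only [List.map_append, List.map_cons, List.map_nil]
      rw [hgc]
      congr 1
      rw [posD_items l, posD_keys]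
      exact List.map_congr_left (fun k h => by rw [hne k h])
    unfold ranksB
    rw [hitems', hn, hrep, scat_append_eq]
    rw [scat_append _ _ _ (by
      intro g hg i hi
      rw [List.length_replicate]; exact hbound g hg i hi)]
    rw [scat_cons', scat_nil, innerF_single]
    rw [show ((l.length : Int)).toNat = l.length from Int.toNat_natCast _]
    have hset := set_last (scat (posD l).items (List.replicate l.length (0 : Int))) 0 0
    rw [scat_length, List.length_replicate] at hset
    rw [hset]
    simp [List.count_eq_zero.2 hmem]

lemma counter_snoc (xs : List String) (x : String) :
    PySem.Dict.counter (xs ++ [x])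
      = (PySem.Dict.counter xs).insert x ((PySem.Dict.counter xs).getD x 0 + 1) := by
  rw [← PySem.Dict.foldl_insert_getD_add_one_eq_counter,
      ← PySem.Dict.foldl_insert_getD_add_one_eq_counter, List.foldl_append]
  rfl

lemma foldA_eq (l : List Char) :
    l.foldl rankBwtStep ((PySem.Dict.empty : PySem.Dict String Int), ([] : List Int))
      = (PySem.Dict.counter (l.map sing), ranksB l) := by
  induction l using List.reverseRecOn with
  | nil => rfl
  | append_singleton l c ih =>
      rw [List.foldl_append, List.foldl_cons, List.foldl_nil, ih, stepA_eq]
      rw [List.map_append, List.map_cons, List.map_nil, counter_snoc]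
      rw [ranksB_rec, PySem.Dict.getD_counter]

-- ===== VERDICT (by name: the statement is the Claim_ definition above) =====
theorem rankBwt_spec : Claim_equal_rankBwt := by
  intro bw _
  show rankBwt bw = rankBwt_alt bw
  have hB : rankBwt_alt bw
      = (ranksB bw.toList, (posD bw.toList).items.map (fun g => (g.1, (g.2.length : Int)))) := rfl
  have hA : rankBwt bw
      = (ranksB bw.toList, (PySem.Dict.counter (bw.toList.map sing)).items) := by
    show ((bw.toList.foldl rankBwtStep (PySem.Dict.empty, [])).2,
          (bw.toList.foldl rankBwtStep (PySem.Dict.empty, [])).1.items) = _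
    rw [foldA_eq]
  rw [hA, hB]
  rw [PySem.Dict.items_counter, posD_items, posD_keys, List.map_map]
  exact congrArg _ (List.map_congr_left (fun k _ => by
    simp only [Function.comp]
    rw [posD_getD_length]))
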